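-- pv_equiv track=rewrite | github.com/gonzo120/PruebaTecnica_Globaltek | Ejercicio3.py | agruparElementos
-- ===== SOURCE A (Python) =====
-- def agruparElementos(lista):
--     grupos = {}
--     for elemento in lista:
--         if elemento not in grupos:
--             grupos[elemento] = []
--         grupos[elemento].append(elemento)
--     salida = []
--     for grupo in grupos.values():
--         salida.append(grupo)
--     return salida
-- ===== SOURCE B (Python) =====
-- def agruparElementos(lista):
--     vistos = []
--     for e in lista:
--         if e not in vistos:
--             vistos.append(e)
--     return [[x for x in lista if x == e] for e in vistos]
-- ===== Notes on version B (the rewrite author's own statement) =====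
-- stated objective: alternative
-- what changed: B uses no dict at all: it first collects the distinct elements in first-appearance order, then rebuilds each group by filtering the whole list for that element (dedup pass + per-key filter passes instead of A's single dict-of-lists pass).
import Mathlib
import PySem

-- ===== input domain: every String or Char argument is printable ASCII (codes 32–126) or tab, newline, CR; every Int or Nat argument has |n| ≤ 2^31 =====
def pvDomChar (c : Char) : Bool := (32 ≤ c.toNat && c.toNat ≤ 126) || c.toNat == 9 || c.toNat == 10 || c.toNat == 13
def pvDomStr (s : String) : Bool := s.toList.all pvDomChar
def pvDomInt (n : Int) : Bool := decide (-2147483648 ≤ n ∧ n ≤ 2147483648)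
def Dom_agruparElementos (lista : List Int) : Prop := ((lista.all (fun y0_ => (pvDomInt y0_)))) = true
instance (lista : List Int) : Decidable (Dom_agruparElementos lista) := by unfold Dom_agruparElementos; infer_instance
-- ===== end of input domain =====

-- B drops the dict entirely: it collects the distinct elements in first-appearance order, then rebuilds each group by filtering the list for that element (alternative decomposition, same result).

-- ===== PORT A =====
def agruparElementos (lista : List Int) : List (List Int) :=
  let grupos : PySem.Dict Int (List Int) :=
    lista.foldl (fun grupos elemento =>
      let grupos := if grupos.contains elemento then grupos
                    else grupos.insert elemento ([] : List Int)
      grupos.modify elemento [] (fun g => g ++ [elemento])) PySem.Dict.empty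
  grupos.values.foldl (fun salida grupo => salida ++ [grupo]) []

-- ===== PORT B =====
def agruparElementos_alt (lista : List Int) : List (List Int) :=
  let vistos : List Int :=
    lista.foldl (fun vistos e => if vistos.contains e then vistos else vistos ++ [e]) []
  vistos.map (fun e => lista.filter (fun x => x == e))

-- ===== PRECONDITION & SPEC =====
def Spec_agruparElementos (lista : List Int) (out : List (List Int)) : Prop := out = agruparElementos_alt lista
instance (lista : List Int) (out : List (List Int)) : Decidable (Spec_agruparElementos lista out) := by unfold Spec_agruparElementos; infer_instance

-- ===== CLAIM (what is proved, stated in full; the proofs are below) =====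
def Claim_equal_agruparElementos : Prop := ∀ (lista : List Int), Dom_agruparElementos lista → Spec_agruparElementos lista (agruparElementos lista)

-- ===== LEMMAS AND PROOFS =====

-- A's per-element step (insert-if-absent then append) is exactly 'modify elemento [] (· ++ [elemento])'.
lemma stepA_eq_modify (d : PySem.Dict Int (List Int)) (e : Int) :
    (if d.contains e then d else d.insert e ([] : List Int)).modify e [] (fun g => g ++ [e])
      = d.modify e [] (fun g => g ++ [e]) := by
  by_cases h : d.contains e
  · simp [h]
  · have h' : d.contains e = false := by simpa using h
    simp [PySem.Dict.modify, h', PySem.Dict.getD_insert_self,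
      PySem.Dict.insert_insert_self, PySem.Dict.getD_of_not_contains d ([] : List Int) h']

lemma agruparElementos_eq (lista : List Int) :
    agruparElementos lista
      = (PySem.Set.ofList lista).map (fun k => List.replicate (lista.count k) k) := by
  unfold agruparElementos
  have hfun : (fun (grupos : PySem.Dict Int (List Int)) (elemento : Int) =>
      (if grupos.contains elemento then grupos else grupos.insert elemento ([] : List Int)).modify
        elemento [] (fun g => g ++ [elemento]))
      = fun d e => d.modify e [] (fun g => g ++ [e]) := by
    funext d e; exact stepA_eq_modify d e
  simp only [hfun, PySem.List.foldl_append_singleton, List.nil_append]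
  set D := lista.foldl (fun d e => d.modify e [] (fun g => g ++ [e])) PySem.Dict.empty with hD
  have hkeys : D.keys = PySem.Set.ofList lista := by
    rw [hD, PySem.Dict.keys_foldl_modify lista ([] : List Int) (fun _ x g => g ++ [x])]
    simp [PySem.Dict.keys_empty, PySem.Set.update_nil_left]
  have hnd : D.keys.Nodup := by rw [hkeys]; exact PySem.Set.nodup_ofList lista
  rw [PySem.Dict.values_eq_map_keys D hnd ([] : List Int), hkeys]
  apply List.map_congr_left
  intro k _
  have : D.getD k [] = List.replicate (lista.count k) k := by
    rw [hD]
    have hm : lista.foldl (fun d e => d.modify e [] (fun g => g ++ [e])) PySem.Dict.empty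
        = (lista.map (fun x => (x, x))).foldl
            (fun d p => d.modify p.1 [] (fun g => g ++ [p.2])) PySem.Dict.empty := by
      rw [List.foldl_map]
    rw [hm, PySem.Dict.getD_foldl_modify_append, PySem.Dict.getD_empty, List.nil_append,
      List.filter_map]
    have : ((fun p : Int × Int => p.1 == k) ∘ fun x => (x, x)) = fun x => x == k := rfl
    rw [this, List.filter_beq]
    simp
  exact this

lemma agruparElementos_alt_eq (lista : List Int) :
    agruparElementos_alt lista
      = (PySem.Set.ofList lista).map (fun k => List.replicate (lista.count k) k) := by
  unfold agruparElementos_alt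
  have hv : lista.foldl (fun vistos e => if vistos.contains e then vistos else vistos ++ [e]) []
      = PySem.Set.ofList lista := by
    rw [PySem.Set.ofList_eq_foldl]; rfl
  rw [hv]
  apply List.map_congr_left
  intro k _
  rw [List.filter_beq]

-- ===== VERDICT (by name: the statement is the Claim_ definition above) =====
theorem agruparElementos_spec : Claim_equal_agruparElementos := by
  intro lista _
  unfold Spec_agruparElementos
  rw [agruparElementos_eq, agruparElementos_alt_eq]
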